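-- pv_equiv track=rewrite | github.com/sai-barath/case-closed-starter-code | data_collector.py | are_separated
-- ===== SOURCE A (Python) =====
-- from collections import deque
--
-- BOARD_HEIGHT = 18
--
-- BOARD_WIDTH = 20
--
-- def are_separated(agent1_trail, agent2_trail):
--     if not agent1_trail or not agent2_trail:
--         return False, None, None
--
--     a1_head = agent1_trail[-1]
--     a2_head = agent2_trail[-1]
--
--     occupied = set(agent1_trail) | set(agent2_trail)
--
--     visited = set()
--     queue = deque([a1_head])
--     visited.add(a1_head)
--
--     while queue:
--         x, y = queue.popleft()
--
--         if (x, y) == a2_head: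
--             return False, None, None
--
--         for dx, dy in [(0, 1), (0, -1), (1, 0), (-1, 0)]:
--             nx = (x + dx) % BOARD_WIDTH
--             ny = (y + dy) % BOARD_HEIGHT
--             npos = (nx, ny)
--
--             if npos in occupied or npos in visited:
--                 continue
--
--             visited.add(npos)
--             queue.append(npos)
--
--     p1_component = len(visited)
--     p2_component = (BOARD_WIDTH * BOARD_HEIGHT) - len(occupied) - p1_component
--
--     return True, p1_component, p2_component
-- ===== SOURCE B (Python) =====
-- BOARD_HEIGHT = 18
--
-- BOARD_WIDTH = 20
--
-- def are_separated(agent1_trail, agent2_trail):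
--     if not agent1_trail or not agent2_trail:
--         return False, None, None
--
--     a1_head = agent1_trail[-1]
--     a2_head = agent2_trail[-1]
--     if a1_head == a2_head:
--         return False, None, None
--
--     occupied = set(agent1_trail) | set(agent2_trail)
--
--     # whole-region saturation: repeatedly dilate the current region by one
--     # torus step, keep only the free cells, and stop at the fixed point.
--     # No queue, no visited set, no per-cell worklist.
--     reach = {a1_head}
--     while True:
--         frontier = {((x + dx) % BOARD_WIDTH, (y + dy) % BOARD_HEIGHT)
--                     for (x, y) in reach
--                     for (dx, dy) in ((0, 1), (0, -1), (1, 0), (-1, 0))}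
--         added = frontier - occupied - reach
--         if not added:
--             break
--         reach |= added
--
--     p1_component = len(reach)
--     p2_component = BOARD_WIDTH * BOARD_HEIGHT - len(occupied) - p1_component
--     return True, p1_component, p2_component
-- ===== Notes on version B (the rewrite author's own statement) =====
-- stated objective: alternative
-- what changed: Replaces the worklist BFS (deque + visited set, separation test inside the loop) by whole-region saturation: the current region is repeatedly dilated by one torus step restricted to free cells until a fixed point, with the only reachable failure case (equal heads) decided before the search.
import Mathlib
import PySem

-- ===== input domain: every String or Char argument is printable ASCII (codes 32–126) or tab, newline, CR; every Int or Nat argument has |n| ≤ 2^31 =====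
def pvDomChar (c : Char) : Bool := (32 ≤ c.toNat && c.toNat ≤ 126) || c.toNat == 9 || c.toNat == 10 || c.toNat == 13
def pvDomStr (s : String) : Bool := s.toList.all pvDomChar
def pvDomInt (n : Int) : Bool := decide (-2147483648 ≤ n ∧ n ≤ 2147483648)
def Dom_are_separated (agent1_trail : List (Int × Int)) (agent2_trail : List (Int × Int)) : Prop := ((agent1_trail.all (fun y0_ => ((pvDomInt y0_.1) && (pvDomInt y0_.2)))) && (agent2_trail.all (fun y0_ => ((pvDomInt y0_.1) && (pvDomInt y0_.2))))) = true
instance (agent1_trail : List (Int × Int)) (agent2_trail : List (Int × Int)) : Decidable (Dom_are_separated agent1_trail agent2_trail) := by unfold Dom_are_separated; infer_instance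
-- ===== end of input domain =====

-- B replaces A's worklist BFS by whole-region saturation (iterated one-step torus dilation
-- of the region, restricted to free cells, to a fixed point), deciding the equal-heads case
-- before the search; an alternative algorithm of the same result, neither mutates arguments.

-- ===== PORT A =====
-- shared geometry helpers: the four directions and the torus-wrapped neighbour
def pvDirs : List (Int × Int) := [(0, 1), (0, -1), (1, 0), (-1, 0)]

def pvNbr (c d : Int × Int) : Int × Int :=
  (PySem.Int.mod (c.1 + d.1) 20, PySem.Int.mod (c.2 + d.2) 18)

-- proof-side measure helpers, needed by the termination proofs of the two loops
def pvBoard : List (Int × Int) :=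
  (List.range 20).flatMap (fun x => (List.range 18).map (fun y => ((x : Int), (y : Int))))

def pvFreeCnt (V : List (Int × Int)) : Nat :=
  (pvBoard.filter (fun c => !(decide (c ∈ V)))).length

theorem mem_pvBoard (c : Int × Int) :
    c ∈ pvBoard ↔ 0 ≤ c.1 ∧ c.1 < 20 ∧ 0 ≤ c.2 ∧ c.2 < 18 := by
  obtain ⟨a, b⟩ := c
  simp only [pvBoard, List.pure_def, List.bind_eq_flatMap, List.mem_flatMap, List.mem_range,
    List.mem_cons, List.not_mem_nil, or_false, List.mem_map, Prod.mk.injEq,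
    exists_eq_right_right]
  constructor
  · rintro ⟨x, hx, y, hy, h1, h2⟩
    refine ⟨?_, ?_, ?_, ?_⟩ <;> omega
  · rintro ⟨h1, h2, h3, h4⟩
    exact ⟨⟨a.toNat, by omega, by omega⟩, ⟨b.toNat, by omega, by omega⟩⟩

theorem nbr_mem_pvBoard (p d : Int × Int) : pvNbr p d ∈ pvBoard := by
  rw [mem_pvBoard]
  exact ⟨PySem.Int.mod_nonneg _ (by norm_num), PySem.Int.mod_lt _ (by norm_num),
    PySem.Int.mod_nonneg _ (by norm_num), PySem.Int.mod_lt _ (by norm_num)⟩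

set_option maxRecDepth 8192 in
theorem pvBoard_nodup : pvBoard.Nodup := by decide

theorem pvFreeCnt_snoc (V : List (Int × Int)) (x : Int × Int)
    (hx : x ∈ pvBoard) (hxv : x ∉ V) : pvFreeCnt (V ++ [x]) + 1 = pvFreeCnt V := by
  unfold pvFreeCnt
  have h1 : pvBoard.filter (fun c => !(decide (c ∈ V ++ [x])))
      = (pvBoard.filter (fun c => !(decide (c ∈ V)))).filter (fun c => !(decide (c = x))) := by
    rw [List.filter_filter]
    apply List.filter_congr
    intro c _
    simp [List.mem_append, Bool.and_comm]
  have hnd : (pvBoard.filter (fun c => !(decide (c ∈ V)))).Nodup := pvBoard_nodup.filter _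
  have hmem : x ∈ pvBoard.filter (fun c => !(decide (c ∈ V))) :=
    List.mem_filter.mpr ⟨hx, by simpa using hxv⟩
  have h2 : (pvBoard.filter (fun c => !(decide (c ∈ V)))).filter (fun c => !(decide (c = x)))
      = (pvBoard.filter (fun c => !(decide (c ∈ V)))).erase x := by
    rw [List.Nodup.erase_eq_filter hnd x]
    apply List.filter_congr; intro c _; simp [bne, Bool.beq_eq_decide_eq]
  rw [h1, h2, List.length_erase_of_mem hmem]
  have := List.length_pos_of_mem hmem
  omega

theorem pvFreeCnt_append (Δ : List (Int × Int)) : ∀ (V : List (Int × Int)),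
    (∀ c ∈ Δ, c ∈ pvBoard) → (∀ c ∈ Δ, c ∉ V) → Δ.Nodup →
    pvFreeCnt (V ++ Δ) + Δ.length = pvFreeCnt V := by
  induction Δ with
  | nil => intro V _ _ _; simp
  | cons x Δ ih =>
    intro V hb hv hnd
    have h1 : V ++ x :: Δ = (V ++ [x]) ++ Δ := by simp
    rw [h1]
    have hnd' := hnd
    simp only [List.nodup_cons] at hnd'
    have ih' := ih (V ++ [x]) (fun c hc => hb c (List.mem_cons_of_mem _ hc))
      (fun c hc => by
        simp only [List.mem_append, List.mem_singleton]
        push Not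
        exact ⟨hv c (List.mem_cons_of_mem _ hc), fun h => hnd'.1 (h ▸ hc)⟩)
      hnd'.2
    have hs := pvFreeCnt_snoc V x (hb x List.mem_cons_self) (hv x List.mem_cons_self)
    simp only [List.length_cons]
    omega

-- one BFS step of A: try to visit the neighbour in direction d of the popped cell
def pvStepA (occ : List (Int × Int)) (c : Int × Int)
    (s : List (Int × Int) × List (Int × Int)) (d : Int × Int) :
    List (Int × Int) × List (Int × Int) :=
  let n := pvNbr c d
  if n ∈ occ ∨ n ∈ s.1 then s else (s.1 ++ [n], s.2 ++ [n])

theorem stepA_shape (occ : List (Int × Int)) (p : Int × Int) :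
    ∀ (ds : List (Int × Int)) (V W : List (Int × Int)),
    ∃ Δ : List (Int × Int),
      ds.foldl (pvStepA occ p) (V, W) = (V ++ Δ, W ++ Δ) ∧
      (∀ c ∈ Δ, c ∈ ds.map (pvNbr p) ∧ c ∉ occ ∧ c ∉ V) ∧
      Δ.Nodup ∧
      (∀ n ∈ ds.map (pvNbr p), n ∉ occ → n ∈ V ++ Δ) := by
  intro ds
  induction ds with
  | nil => intro V W; exact ⟨[], by simp, by simp, List.nodup_nil, by simp⟩
  | cons d ds ih =>
    intro V W
    by_cases h : pvNbr p d ∈ occ ∨ pvNbr p d ∈ V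
    · obtain ⟨Δ, heq, hprops, hnd, hcl⟩ := ih V W
      refine ⟨Δ, ?_, ?_, hnd, ?_⟩
      · simpa [pvStepA, h] using heq
      · intro c hc
        obtain ⟨h1, h2, h3⟩ := hprops c hc
        exact ⟨List.mem_cons_of_mem _ h1, h2, h3⟩
      · intro n hn hno
        rw [List.map_cons] at hn
        rcases List.mem_cons.mp hn with h1 | h1
        · subst h1
          rcases h with h | h
          · exact absurd h hno
          · exact List.mem_append.mpr (Or.inl h)
        · exact hcl n h1 hno
    · push Not at h
      obtain ⟨Δ, heq, hprops, hnd, hcl⟩ := ih (V ++ [pvNbr p d]) (W ++ [pvNbr p d])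
      refine ⟨pvNbr p d :: Δ, ?_, ?_, ?_, ?_⟩
      · have : List.foldl (pvStepA occ p) (V, W) (d :: ds)
            = List.foldl (pvStepA occ p) (V ++ [pvNbr p d], W ++ [pvNbr p d]) ds := by
          simp [pvStepA, h.1, h.2]
        rw [this, heq]
        simp
      · intro c hc
        rcases List.mem_cons.mp hc with h1 | h1
        · subst h1; exact ⟨by simp, h.1, h.2⟩
        · obtain ⟨h1', h2, h3⟩ := hprops c h1
          refine ⟨List.mem_cons_of_mem _ h1', h2, fun hv => h3 (List.mem_append.mpr (Or.inl hv))⟩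
      · refine List.nodup_cons.mpr ⟨fun hc => ?_, hnd⟩
        exact (hprops _ hc).2.2 (by simp)
      · intro n hn hno
        rw [List.map_cons] at hn
        rcases List.mem_cons.mp hn with h1 | h1
        · subst h1; simp
        · have := hcl n h1 hno
          simpa using this

-- A's while loop: V = visited, W = queue (FIFO: pop at the head, append at the tail)
def loopA (occ : List (Int × Int)) (a2 : Int × Int) (V W : List (Int × Int)) :
    Bool × Option Int × Option Int :=
  match W with
  | [] => (true, some ((V.length : Int)),
           some ((20 * 18 : Int) - (occ.length : Int) - (V.length : Int)))
  | w :: W' =>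
    if w = a2 then (false, none, none)
    else
      let s := pvDirs.foldl (pvStepA occ w) (V, W')
      loopA occ a2 s.1 s.2
termination_by 361 * pvFreeCnt V + W.length
decreasing_by
  obtain ⟨Δ, heq, hprops, hnd, -⟩ := stepA_shape occ w pvDirs V W'
  have hb : ∀ c ∈ Δ, c ∈ pvBoard := by
    intro c hc
    obtain ⟨hm, -, -⟩ := hprops c hc
    obtain ⟨d, -, hd⟩ := List.mem_map.mp hm
    exact hd ▸ nbr_mem_pvBoard w d
  have hv : ∀ c ∈ Δ, c ∉ V := fun c hc => (hprops c hc).2.2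
  have hcnt := pvFreeCnt_append Δ V hb hv hnd
  simp only [heq, List.length_append, List.length_cons]
  omega

def are_separated (agent1_trail : List (Int × Int)) (agent2_trail : List (Int × Int)) :
    Bool × Option Int × Option Int :=
  match agent1_trail.getLast?, agent2_trail.getLast? with
  | some a1_head, some a2_head =>
    let occupied := PySem.Set.union (PySem.Set.ofList agent1_trail) (PySem.Set.ofList agent2_trail)
    loopA occupied a2_head (PySem.Set.add (PySem.Set.empty) a1_head) [a1_head]
  | _, _ => (false, none, none)

-- ===== PORT B =====
-- the one-step torus dilation of a whole region, as a set (Python's set comprehension)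
def pvFrontier (R : List (Int × Int)) : List (Int × Int) :=
  PySem.Set.ofList (R.flatMap (fun c => pvDirs.map (pvNbr c)))

-- 'frontier - occupied - reach' (set differences; a filter keeps the distinct elements)
def pvAdded (occ R : List (Int × Int)) : List (Int × Int) :=
  (pvFrontier R).filter (fun n => !(decide (n ∈ occ)) && !(decide (n ∈ R)))

theorem mem_pvAdded (occ R : List (Int × Int)) (n : Int × Int) :
    n ∈ pvAdded occ R ↔ (∃ c ∈ R, n ∈ pvDirs.map (pvNbr c)) ∧ n ∉ occ ∧ n ∉ R := by
  simp [pvAdded, List.mem_filter, pvFrontier, PySem.Set.mem_ofList, List.mem_flatMap]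

theorem pvAdded_props (occ R : List (Int × Int)) :
    (pvAdded occ R).Nodup ∧ (∀ c ∈ pvAdded occ R, c ∈ pvBoard) ∧
    (∀ c ∈ pvAdded occ R, c ∉ R) := by
  refine ⟨(PySem.Set.nodup_ofList _).filter _, ?_, ?_⟩
  · intro c hc
    obtain ⟨⟨p, -, hm⟩, -, -⟩ := (mem_pvAdded occ R c).mp hc
    obtain ⟨d, -, hd⟩ := List.mem_map.mp hm
    exact hd ▸ nbr_mem_pvBoard p d
  · exact fun c hc => ((mem_pvAdded occ R c).mp hc).2.2

-- B's saturation loop: reach grows by the fresh dilation until nothing new appears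
-- ('reach |= added' with added disjoint from reach is the append of the new elements)
def loopB (occ R : List (Int × Int)) : List (Int × Int) :=
  if pvAdded occ R = [] then R else loopB occ (R ++ pvAdded occ R)
termination_by pvFreeCnt R
decreasing_by
  rename_i hne
  obtain ⟨hnd, hb, hv⟩ := pvAdded_props occ R
  have hcnt := pvFreeCnt_append (pvAdded occ R) R hb hv hnd
  have hlen : 0 < (pvAdded occ R).length := List.length_pos_iff.mpr hne
  omega

def are_separated_alt (agent1_trail : List (Int × Int)) (agent2_trail : List (Int × Int)) :
    Bool × Option Int × Option Int :=
  match agent1_trail.getLast? with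
  | none => (false, none, none)
  | some a1_head =>
    match agent2_trail.getLast? with
    | none => (false, none, none)
    | some a2_head =>
      if a1_head = a2_head then (false, none, none)
      else
        let occupied :=
          PySem.Set.union (PySem.Set.ofList agent1_trail) (PySem.Set.ofList agent2_trail)
        let reach := loopB occupied (PySem.Set.add (PySem.Set.empty) a1_head)
        (true, some ((reach.length : Int)),
         some ((20 * 18 : Int) - (occupied.length : Int) - (reach.length : Int)))

-- ===== PRECONDITION & SPEC =====
def Spec_are_separated (agent1_trail : List (Int × Int)) (agent2_trail : List (Int × Int)) (out : Bool × Option Int × Option Int) : Prop := out = are_separated_alt agent1_trail agent2_trail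
instance (agent1_trail : List (Int × Int)) (agent2_trail : List (Int × Int)) (out : Bool × Option Int × Option Int) : Decidable (Spec_are_separated agent1_trail agent2_trail out) := by unfold Spec_are_separated; infer_instance

-- ===== CLAIM (what is proved, stated in full; the proofs are below) =====
def Claim_equal_are_separated : Prop := ∀ (agent1_trail : List (Int × Int)) (agent2_trail : List (Int × Int)), Dom_are_separated agent1_trail agent2_trail → Spec_are_separated agent1_trail agent2_trail (are_separated agent1_trail agent2_trail)

-- ===== LEMMAS AND PROOFS =====

-- one flood/dilation step: d is a free torus-neighbour of c
def pvStepRel (occ : List (Int × Int)) (c d : Int × Int) : Prop :=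
  d ∈ pvDirs.map (pvNbr c) ∧ d ∉ occ

-- if u is visited and every settled cell is closed, a path from u ends visited or passes the worklist
theorem reach_escape (occ V W : List (Int × Int))
    (hcl : ∀ v ∈ V, v ∉ W → ∀ n, pvStepRel occ v n → n ∈ V)
    {u c : Int × Int} (h : Relation.ReflTransGen (pvStepRel occ) u c) (hu : u ∈ V) :
    c ∈ V ∨ ∃ w ∈ W, Relation.ReflTransGen (pvStepRel occ) w c := by
  induction h using Relation.ReflTransGen.head_induction_on with
  | refl => exact Or.inl hu
  | head hstep hrest ih =>
    rename_i a b
    by_cases haW : a ∈ W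
    · exact Or.inr ⟨a, haW, Relation.ReflTransGen.head hstep hrest⟩
    · exact ih (hcl a hu haW b hstep)

theorem loopA_spec (occ : List (Int × Int)) (a2 : Int × Int) (ha2 : a2 ∈ occ) :
    ∀ (V W : List (Int × Int)),
    (∀ w ∈ W, w ∈ V) →
    (∀ v ∈ V, v ∉ W → ∀ n, pvStepRel occ v n → n ∈ V) →
    V.Nodup → (∀ w ∈ W, w ≠ a2) →
    ∃ Vf : List (Int × Int),
      loopA occ a2 V W = (true, some ((Vf.length : Int)),
        some ((20 * 18 : Int) - (occ.length : Int) - (Vf.length : Int))) ∧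
      Vf.Nodup ∧
      (∀ c, c ∈ Vf ↔ c ∈ V ∨ ∃ w ∈ W, Relation.ReflTransGen (pvStepRel occ) w c) := by
  intro V W
  induction V, W using loopA.induct occ a2 with
  | case1 V =>
    intro hWV hcl hnd ha2W
    refine ⟨V, by rw [loopA], hnd, ?_⟩
    intro c; simp
  | case2 V W' =>
    intro hWV hcl hnd ha2W
    exact absurd rfl (ha2W a2 List.mem_cons_self)
  | case3 V w W' hne sdef ih =>
    intro hWV hcl hnd ha2W
    obtain ⟨Δ, heq, hprops, hndΔ, hclosed⟩ := stepA_shape occ w pvDirs V W'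
    have hs : sdef = (V ++ Δ, W' ++ Δ) := heq
    rw [hs] at ih
    have hWV1 : ∀ x ∈ W' ++ Δ, x ∈ V ++ Δ := by
      intro x hx
      rcases List.mem_append.mp hx with h | h
      · exact List.mem_append.mpr (Or.inl (hWV x (List.mem_cons_of_mem _ h)))
      · exact List.mem_append.mpr (Or.inr h)
    have hcl1 : ∀ v ∈ V ++ Δ, v ∉ W' ++ Δ → ∀ n, pvStepRel occ v n → n ∈ V ++ Δ := by
      intro v hv hvw n hn
      rcases List.mem_append.mp hv with h | h
      · by_cases hvw2 : v = w
        · subst hvw2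
          exact hclosed n hn.1 hn.2
        · have hvW : v ∉ w :: W' := by
            intro hmem
            rcases List.mem_cons.mp hmem with h' | h'
            · exact hvw2 h'
            · exact hvw (List.mem_append.mpr (Or.inl h'))
          exact List.mem_append.mpr (Or.inl (hcl v h hvW n hn))
      · exact absurd (List.mem_append.mpr (Or.inr h)) hvw
    have hnd1 : (V ++ Δ).Nodup := by
      rw [List.nodup_append]
      refine ⟨hnd, hndΔ, ?_⟩
      intro a ha b hb heqab
      exact (hprops b hb).2.2 (heqab ▸ ha)
    have ha2W1 : ∀ x ∈ W' ++ Δ, x ≠ a2 := by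
      intro x hx
      rcases List.mem_append.mp hx with h | h
      · exact ha2W x (List.mem_cons_of_mem _ h)
      · intro heq2; exact (hprops x h).2.1 (heq2 ▸ ha2)
    obtain ⟨Vf, heqf, hndf, hmemf⟩ := ih hWV1 hcl1 hnd1 ha2W1
    refine ⟨Vf, ?_, hndf, ?_⟩
    · rw [loopA]
      simp only [hne, if_false, heq]
      exact heqf
    · intro c
      rw [hmemf c]
      constructor
      · rintro (h | ⟨u, hu, hr⟩)
        · rcases List.mem_append.mp h with h | h
          · exact Or.inl h
          · exact Or.inr ⟨w, List.mem_cons_self,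
              Relation.ReflTransGen.single ⟨(hprops c h).1, (hprops c h).2.1⟩⟩
        · rcases List.mem_append.mp hu with h | h
          · exact Or.inr ⟨u, List.mem_cons_of_mem _ h, hr⟩
          · exact Or.inr ⟨w, List.mem_cons_self,
              Relation.ReflTransGen.head ⟨(hprops u h).1, (hprops u h).2.1⟩ hr⟩
      · rintro (h | ⟨u, hu, hr⟩)
        · exact Or.inl (List.mem_append.mpr (Or.inl h))
        · rcases List.mem_cons.mp hu with h' | h'
          · subst h'
            exact reach_escape occ (V ++ Δ) (W' ++ Δ) hcl1 hr
              (List.mem_append.mpr (Or.inl (hWV u List.mem_cons_self)))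
          · exact Or.inr ⟨u, List.mem_append.mpr (Or.inl h'), hr⟩

theorem loopB_spec (occ : List (Int × Int)) :
    ∀ (R : List (Int × Int)), R.Nodup →
    (loopB occ R).Nodup ∧
      (∀ c, c ∈ loopB occ R ↔ ∃ r ∈ R, Relation.ReflTransGen (pvStepRel occ) r c) := by
  intro R
  induction R using loopB.induct occ with
  | case1 R hstop =>
    intro hnd
    rw [loopB, if_pos hstop]
    refine ⟨hnd, fun c => ⟨fun hc => ⟨c, hc, Relation.ReflTransGen.refl⟩, ?_⟩⟩
    rintro ⟨r, hr, hrtg⟩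
    -- added = [] means R is closed under pvStepRel
    have hclosed : ∀ v ∈ R, ∀ n, pvStepRel occ v n → n ∈ R := by
      intro v hv n hn
      by_contra hnR
      have : n ∈ pvAdded occ R := (mem_pvAdded occ R n).mpr ⟨⟨v, hv, hn.1⟩, hn.2, hnR⟩
      rw [hstop] at this
      exact List.not_mem_nil this
    clear hstop
    induction hrtg with
    | refl => exact hr
    | tail _ hstep ih => exact hclosed _ ih _ hstep
  | case2 R hne ih =>
    intro hnd
    obtain ⟨hndΔ, hb, hv⟩ := pvAdded_props occ R
    have hnd1 : (R ++ pvAdded occ R).Nodup := by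
      rw [List.nodup_append]
      refine ⟨hnd, hndΔ, ?_⟩
      intro a ha b hb' heqab
      exact hv b hb' (heqab ▸ ha)
    obtain ⟨hndf, hmemf⟩ := ih hnd1
    rw [loopB, if_neg hne]
    refine ⟨hndf, fun c => ?_⟩
    rw [hmemf c]
    constructor
    · rintro ⟨u, hu, hr⟩
      rcases List.mem_append.mp hu with h | h
      · exact ⟨u, h, hr⟩
      · obtain ⟨⟨p, hp, hm⟩, hno, -⟩ := (mem_pvAdded occ R u).mp h
        exact ⟨p, hp, Relation.ReflTransGen.head ⟨hm, hno⟩ hr⟩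
    · rintro ⟨u, hu, hr⟩
      exact ⟨u, List.mem_append.mpr (Or.inl hu), hr⟩

-- ===== VERDICT (by name: the statement is the Claim_ definition above) =====
theorem are_separated_spec : Claim_equal_are_separated := by
  intro t1 t2 _
  unfold Spec_are_separated are_separated are_separated_alt
  cases h1 : t1.getLast? with
  | none => cases h2 : t2.getLast? <;> rfl
  | some a1 =>
    cases h2 : t2.getLast? with
    | none => rfl
    | some a2 =>
      dsimp only
      have ha1t1 : a1 ∈ t1 := List.mem_of_getLast? h1
      have ha2t2 : a2 ∈ t2 := List.mem_of_getLast? h2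
      have hV0 : PySem.Set.add (PySem.Set.empty) a1 = [a1] := rfl
      by_cases hEq : a1 = a2
      · subst hEq
        rw [loopA.eq_def]
        simp
      · have hocc : ∀ c, c ∈ PySem.Set.union (PySem.Set.ofList t1) (PySem.Set.ofList t2)
            ↔ c ∈ t1 ∨ c ∈ t2 := by
          intro c
          rw [PySem.Set.mem_union, PySem.Set.mem_ofList, PySem.Set.mem_ofList]
        set occ := PySem.Set.union (PySem.Set.ofList t1) (PySem.Set.ofList t2) with hodef
        have ha2occ : a2 ∈ occ := (hocc a2).mpr (Or.inr ha2t2)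
        -- A's BFS from the head
        obtain ⟨VfA, heqA, hndA, hmemA⟩ := loopA_spec occ a2 ha2occ [a1] [a1]
          (by intro w hw; exact hw)
          (by intro v hv hvw; exact absurd hv hvw)
          (List.nodup_singleton a1)
          (by intro w hw; rw [List.mem_singleton] at hw; exact hw ▸ hEq)
        -- B's saturation from the head
        obtain ⟨hndB, hmemB⟩ := loopB_spec occ [a1] (List.nodup_singleton a1)
        set RB := loopB occ [a1] with hRBdef
        have hsame : ∀ c, c ∈ VfA ↔ c ∈ RB := by
          intro c
          rw [hmemA c, hmemB c]
          constructor
          · rintro (h | h)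
            · exact ⟨c, h, Relation.ReflTransGen.refl⟩
            · exact h
          · exact Or.inr
        have hperm : VfA.Perm RB :=
          (List.perm_ext_iff_of_nodup hndA hndB).mpr hsame
        rw [if_neg hEq, hV0, heqA, hperm.length_eq]
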